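-- pv_equiv track=rewrite | github.com/MR-Raven/Scrabble | hashing.py | hashFunc
-- ===== SOURCE A (Python) =====
-- def hashFunc(word): # Making something trickier doesn't make sence not mainly but also in case of removing huge dictionary
--     hashCode = 0
--     module = 1000000007
--     power = 1
--     for letter in range(len(word) - 1, -1, -1):
--         hashCode += (ord(word[letter]) - ord('a') + 1) * power
--         hashCode %= module
--         power *= 26
--     return hashCode
-- ===== SOURCE B (Python) =====
-- def hashFunc(word):
--     module = 1000000007
--     hashCode = 0
--     for ch in word:
--         hashCode = (hashCode * 26 + ord(ch) - 96) % module
--     return hashCode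
-- ===== Notes on version B (the rewrite author's own statement) =====
-- stated objective: faster
-- what changed: Replaces A's right-to-left loop with an ever-growing unreduced bignum power (power *= 26) by a left-to-right Horner evaluation whose accumulator is reduced mod 1000000007 each step, keeping every intermediate bounded.
import Mathlib
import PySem

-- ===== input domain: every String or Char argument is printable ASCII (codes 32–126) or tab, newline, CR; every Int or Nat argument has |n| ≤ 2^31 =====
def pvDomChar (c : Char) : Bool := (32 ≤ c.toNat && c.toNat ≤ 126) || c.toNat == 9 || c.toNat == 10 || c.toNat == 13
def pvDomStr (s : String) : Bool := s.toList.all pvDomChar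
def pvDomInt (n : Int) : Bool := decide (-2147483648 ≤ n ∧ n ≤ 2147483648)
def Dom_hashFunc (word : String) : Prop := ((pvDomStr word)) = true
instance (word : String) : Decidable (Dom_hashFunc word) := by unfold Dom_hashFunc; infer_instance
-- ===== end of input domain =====

-- B replaces A's ever-growing bignum power (power *= 26, never reduced) by a left-to-right
-- Horner loop that keeps the accumulator below the modulus: O(n) word-size ops instead of
-- O(n^2)-bit bignum arithmetic. Return values are identical.

-- ===== PORT A =====
-- A: iterate letter = len(word)-1 .. 0, accumulate (ord(word[letter]) - ord('a') + 1) * power,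
--    reducing hashCode (but not power) mod 1000000007 each step.
def hashFunc (word : String) : Int :=
  let cs := word.toList
  let module : Int := 1000000007
  let st := (PySem.List.pyRange ((cs.length : Int) - 1) (-1) (-1)).foldl
    (fun (st : Int × Int) letter =>
      let c := PySem.List.pyGetD cs letter ' '
      (PySem.Int.mod (st.1 + ((c.toNat : Int) - ('a'.toNat : Int) + 1) * st.2) module,
       st.2 * 26))
    (0, 1)
  st.1

-- ===== PORT B =====
-- B: forward Horner with the accumulator reduced each step.
def hashFunc_alt (word : String) : Int :=
  word.toList.foldl
    (fun hashCode c => PySem.Int.mod (hashCode * 26 + ((c.toNat : Int) - 96)) 1000000007)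
    0

-- ===== PRECONDITION & SPEC =====
def Spec_hashFunc (word : String) (out : Int) : Prop := out = hashFunc_alt word
instance (word : String) (out : Int) : Decidable (Spec_hashFunc word out) := by unfold Spec_hashFunc; infer_instance

-- ===== CLAIM (what is proved, stated in full; the proofs are below) =====
def Claim_equal_hashFunc : Prop := ∀ (word : String), Dom_hashFunc word → Spec_hashFunc word (hashFunc word)

-- ===== LEMMAS AND PROOFS =====

-- letter value, and the unreduced place-value polynomial with lowest weight first
def pvVal (c : Char) : Int := (c.toNat : Int) - 96

def pvT : List Char → Int
  | [] => 0
  | c :: t => pvVal c + 26 * pvT t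

theorem pvT_append_singleton (l : List Char) (c : Char) :
    pvT (l ++ [c]) = pvT l + pvVal c * 26 ^ l.length := by
  induction l with
  | nil => simp [pvT]
  | cons x t ih => simp [pvT, ih, pow_succ]; ring

-- A's index loop is a fold over the reversed character list
theorem pvA_fold_reverse {β : Type} (cs : List Char) (g : β → Char → β) (init : β) :
    (PySem.List.pyRange ((cs.length : Int) - 1) (-1) (-1)).foldl
      (fun st i => g st (PySem.List.pyGetD cs i ' ')) init
    = cs.reverse.foldl g init := by
  have h1 : PySem.List.pyRange ((cs.length : Int) - 1) (-1) (-1)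
      = (PySem.List.pyRange 0 (cs.length : Int) 1).reverse := by
    have := PySem.List.pyRange_neg_one_eq_reverse ((cs.length : Int) - 1) (-1)
    simpa using this
  rw [h1, ← List.foldl_map, List.map_reverse,
      PySem.List.map_pyGetD_pyRange_zero' cs ' ']

theorem pvMod_add_left (a x p : Int) : (a % p + x) % p = (a + x) % p := by
  conv_rhs => rw [Int.add_emod]
  rw [Int.add_emod (a % p) x, Int.emod_emod_of_dvd _ dvd_rfl]

theorem pvMod_mul_add (a x p : Int) : (a % p * 26 + x) % p = (a * 26 + x) % p := by
  rw [Int.add_emod, Int.mul_emod, Int.emod_emod_of_dvd _ dvd_rfl, ← Int.mul_emod,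
      ← Int.add_emod]

-- A's loop invariant: reduced accumulator plus pw times the remaining polynomial
theorem pvA_loop (l : List Char) : ∀ (h pw : Int),
    ((l.foldl
      (fun (st : Int × Int) c => ((st.1 + pvVal c * st.2) % 1000000007, st.2 * 26))
      (h % 1000000007, pw)).1) = (h + pw * pvT l) % 1000000007 := by
  induction l with
  | nil => intro h pw; simp [pvT]
  | cons c t ih =>
    intro h pw
    simp only [List.foldl_cons, pvMod_add_left]
    rw [ih (h + pvVal c * pw) (pw * 26)]
    have : h + pvVal c * pw + pw * 26 * pvT t = h + pw * pvT (c :: t) := by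
      rw [pvT]; ring
    rw [this]

-- B's loop invariant: Horner with reduction equals reduction of plain Horner
theorem pvB_loop (l : List Char) : ∀ (h : Int),
    l.foldl (fun hashCode c => (hashCode * 26 + pvVal c) % 1000000007) (h % 1000000007)
    = (l.foldl (fun hashCode c => hashCode * 26 + pvVal c) h) % 1000000007 := by
  induction l with
  | nil => intro h; simp
  | cons c t ih =>
    intro h
    simp only [List.foldl_cons, pvMod_mul_add]
    exact ih (h * 26 + pvVal c)

-- plain Horner computes the reversed polynomial
theorem pvHorner_eq (l : List Char) : ∀ (h : Int),
    l.foldl (fun hashCode c => hashCode * 26 + pvVal c) h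
    = h * 26 ^ l.length + pvT l.reverse := by
  induction l with
  | nil => intro h; simp [pvT]
  | cons c t ih =>
    intro h
    simp only [List.foldl_cons, ih, List.reverse_cons, pvT_append_singleton,
      List.length_reverse, List.length_cons, pow_succ]
    ring

-- ===== VERDICT (by name: the statement is the Claim_ definition above) =====
theorem hashFunc_spec : Claim_equal_hashFunc := by
  intro word _
  unfold Spec_hashFunc hashFunc hashFunc_alt
  simp only []
  have hfa : (fun (st : Int × Int) (c : Char) =>
        (PySem.Int.mod (st.1 + ((c.toNat : Int) - ('a'.toNat : Int) + 1) * st.2) 1000000007,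
         st.2 * 26))
      = (fun (st : Int × Int) c => ((st.1 + pvVal c * st.2) % 1000000007, st.2 * 26)) := by
    funext st c
    have h97 : (('a'.toNat : Int)) = 97 := rfl
    rw [PySem.Int.mod_eq_emod_of_pos (by norm_num), h97]
    simp only [pvVal]
    ring_nf
  have hfb : (fun (hashCode : Int) (c : Char) =>
        PySem.Int.mod (hashCode * 26 + ((c.toNat : Int) - 96)) 1000000007)
      = (fun (hashCode : Int) c => (hashCode * 26 + pvVal c) % 1000000007) := by
    funext hashCode c
    rw [PySem.Int.mod_eq_emod_of_pos (by norm_num)]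
    simp only [pvVal]
  rw [pvA_fold_reverse word.toList
        (fun (st : Int × Int) c =>
          (PySem.Int.mod (st.1 + ((c.toNat : Int) - ('a'.toNat : Int) + 1) * st.2) 1000000007,
           st.2 * 26)) (0, 1)]
  simp only [hfa, hfb]
  have h0 : ((0 : Int), (1 : Int)) = ((0 : Int) % 1000000007, (1 : Int)) := by norm_num
  rw [h0, pvA_loop word.toList.reverse 0 1]
  have h0' : (0 : Int) = (0 : Int) % 1000000007 := by norm_num
  rw [h0', pvB_loop word.toList 0, pvHorner_eq]
  simp
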